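-- pv_equiv track=rewrite | github.com/ren4ndev/py-tst-reports | modules/process_extraction/process_extraction.py | _extract_duplicates
-- ===== SOURCE A (Python) =====
-- def _extract_duplicates(extracted_data):
--     seen = set()
--     repeated = set()
--     for (sheet_date, processes) in extracted_data:
--         for item in processes:
--             if item in seen:
--                 repeated.add(item)
--             else:
--                 seen.add(item)
--
--     duplicates_dict = dict()
--     for (sheet_date, processes) in extracted_data:
--         for item in processes:
--             if item in repeated:
--                 if item in duplicates_dict:
--                     duplicates_dict[item].append(sheet_date)
--                 else:
--                     duplicates_dict[item] = [sheet_date]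
--     return duplicates_dict
-- ===== SOURCE B (Python) =====
-- def _extract_duplicates(extracted_data):
--     dates_by_item = {}
--     for sheet_date, processes in extracted_data:
--         for item in processes:
--             dates_by_item.setdefault(item, []).append(sheet_date)
--     return {item: dates for item, dates in dates_by_item.items() if len(dates) > 1}
-- ===== Notes on version B (the rewrite author's own statement) =====
-- stated objective: simpler
-- what changed: Replaces A's two nested passes (set-tracking pass to find repeated items, then a second collection pass) by one index-building pass mapping every item to all its sheet_dates, followed by a comprehension keeping entries with more than one date.
import Mathlib
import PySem

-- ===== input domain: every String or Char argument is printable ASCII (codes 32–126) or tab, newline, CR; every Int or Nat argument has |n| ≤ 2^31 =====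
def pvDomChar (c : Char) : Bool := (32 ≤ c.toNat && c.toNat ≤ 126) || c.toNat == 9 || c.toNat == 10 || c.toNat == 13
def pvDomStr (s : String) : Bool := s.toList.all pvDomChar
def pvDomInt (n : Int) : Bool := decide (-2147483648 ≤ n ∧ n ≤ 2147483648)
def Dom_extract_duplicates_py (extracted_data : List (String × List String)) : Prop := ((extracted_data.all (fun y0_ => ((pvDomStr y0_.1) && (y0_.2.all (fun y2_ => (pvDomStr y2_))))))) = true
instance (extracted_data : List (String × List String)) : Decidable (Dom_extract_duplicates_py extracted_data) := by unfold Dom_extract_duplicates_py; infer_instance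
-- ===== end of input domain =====

-- B replaces A's two nested passes (find repeated items with two sets, then collect dates)
-- by one index-building pass (item → all its dates) followed by a len>1 filter; objective: simpler.

-- ===== PORT A =====
-- literal port of A: pass 1 builds (seen, repeated); pass 2 collects dates of repeated items
def extract_duplicates_py (extracted_data : List (String × List String)) : List (String × List String) :=
  let sr := extracted_data.foldl
    (fun (sr : PySem.Set String × PySem.Set String) p =>
      p.2.foldl
        (fun sr item =>
          if PySem.Set.contains sr.1 item then (sr.1, PySem.Set.add sr.2 item)
          else (PySem.Set.add sr.1 item, sr.2)) sr)
    (PySem.Set.empty, PySem.Set.empty)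
  let repeated := sr.2
  let duplicates_dict := extracted_data.foldl
    (fun (d : PySem.Dict String (List String)) p =>
      p.2.foldl
        (fun d item =>
          if PySem.Set.contains repeated item then
            if d.contains item then d.insert item (d.getD item [] ++ [p.1])
            else d.insert item [p.1]
          else d) d)
    PySem.Dict.empty
  duplicates_dict.items

-- ===== PORT B =====
-- literal port of B: one setdefault/append indexing pass, then keep entries with > 1 date
def extract_duplicates_py_alt (extracted_data : List (String × List String)) : List (String × List String) :=
  let dates_by_item := extracted_data.foldl
    (fun (d : PySem.Dict String (List String)) p =>
      p.2.foldl (fun d item => d.modify item [] (· ++ [p.1])) d)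
    PySem.Dict.empty
  dates_by_item.items.filter (fun e => decide (1 < e.2.length))

-- ===== PRECONDITION & SPEC =====
def Spec_extract_duplicates_py (extracted_data : List (String × List String)) (out : List (String × List String)) : Prop := out = extract_duplicates_py_alt extracted_data
instance (extracted_data : List (String × List String)) (out : List (String × List String)) : Decidable (Spec_extract_duplicates_py extracted_data out) := by unfold Spec_extract_duplicates_py; infer_instance

-- ===== CLAIM (what is proved, stated in full; the proofs are below) =====
def Claim_equal_extract_duplicates_py : Prop := ∀ (extracted_data : List (String × List String)), Dom_extract_duplicates_py extracted_data → Spec_extract_duplicates_py extracted_data (extract_duplicates_py extracted_data)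

-- ===== LEMMAS AND PROOFS =====

-- the flat list of (item, sheet_date) occurrences, in traversal order
def occsOf (xs : List (String × List String)) : List (String × String) :=
  xs.flatMap (fun p => p.2.map (fun item => (item, p.1)))

-- a nested fold over sheets and their items is the fold over the flat occurrence list
theorem nestedFold {β : Type} (g : β → (String × String) → β)
    (xs : List (String × List String)) (init : β) :
    xs.foldl (fun d p => p.2.foldl (fun d item => g d (item, p.1)) d) init
      = (occsOf xs).foldl g init := by
  induction xs generalizing init with
  | nil => rfl
  | cons p t ih => simp [occsOf, List.foldl_append, List.foldl_map, ih, List.flatMap_cons]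

def buildIdx (l : List (String × String)) : PySem.Dict String (List String) :=
  l.foldl (fun d o => d.modify o.1 [] (· ++ [o.2])) PySem.Dict.empty

def datesIn (l : List (String × String)) (k : String) : List String :=
  (l.filter (fun o => o.1 == k)).map (·.2)

theorem items_buildIdx (l : List (String × String)) :
    (buildIdx l).items
      = (PySem.Set.ofList (l.map (·.1))).map (fun k => (k, datesIn l k)) := by
  have hnd : (buildIdx l).keys.Nodup :=
    PySem.Dict.nodup_keys_foldl_modify_key l (fun o => o.1) [] (fun _ o v => v ++ [o.2])
      PySem.Dict.empty (by simp [PySem.Dict.keys_empty])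
  have hkeys : (buildIdx l).keys = PySem.Set.ofList (l.map (·.1)) := by
    have := PySem.Dict.keys_foldl_modify_key (l := l) (key := fun o => o.1) (d0 := [])
      (f := fun _ o v => v ++ [o.2]) (d := PySem.Dict.empty)
    simpa [buildIdx, PySem.Dict.keys_empty, PySem.Set.update_nil_left] using this
  have hget : ∀ k, (buildIdx l).getD k [] = datesIn l k := by
    intro k
    have := PySem.Dict.getD_foldl_modify_append l PySem.Dict.empty k
    simpa [buildIdx, datesIn, PySem.Dict.getD_empty] using this
  rw [PySem.Dict.items_eq_map_keys _ hnd [], hkeys]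
  exact List.map_congr_left (fun k _ => by rw [hget])

-- pass-1 invariant: membership in the "repeated" component of the fold state
theorem pass1_mem (l : List (String × String)) (s r : PySem.Set String) (x : String) :
    (x ∈ (l.foldl
        (fun (sr : PySem.Set String × PySem.Set String) o =>
          if PySem.Set.contains sr.1 o.1 then (sr.1, PySem.Set.add sr.2 o.1)
          else (PySem.Set.add sr.1 o.1, sr.2)) (s, r)).2)
      ↔ (x ∈ r ∨ (x ∈ s ∧ 1 ≤ (l.map (·.1)).count x) ∨ 2 ≤ (l.map (·.1)).count x) := by
  induction l generalizing s r with
  | nil => simp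
  | cons o t ih =>
    simp only [List.foldl_cons, List.map_cons]
    by_cases hc : PySem.Set.contains s o.1
    · have hcm : o.1 ∈ s := by simpa using hc
      rw [if_pos hc, ih, PySem.Set.mem_add]
      by_cases hx : x = o.1
      · subst hx
        have h1 : 1 ≤ List.count o.1 (t.map (·.1)) + 1 := by omega
        simp [List.count_cons_self, hcm, h1]
      · have hcount : List.count x (o.1 :: t.map (·.1)) = List.count x (t.map (·.1)) := by
          simp [Ne.symm hx]
        rw [hcount]; tauto
    · have hcm : o.1 ∉ s := by simpa using hc
      rw [if_neg hc, ih, PySem.Set.mem_add]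
      by_cases hx : x = o.1
      · subst hx
        by_cases hr : o.1 ∈ r <;>
          simp only [List.count_cons_self, PySem.Set.mem_add, hr, hcm, eq_self_iff_true,
            or_true, true_and, true_or, false_and, false_or, iff_true, or_false] <;>
          omega
      · have hcount : List.count x (o.1 :: t.map (·.1)) = List.count x (t.map (·.1)) := by
          simp [Ne.symm hx]
        rw [hcount]; tauto

-- Python's set(...) construction (first occurrences) commutes with filtering
theorem ofList_filter (p : String → Bool) (l acc : List String) :
    (l.filter p).foldl PySem.Set.add (acc.filter p)
      = (l.foldl PySem.Set.add acc).filter p := by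
  induction l generalizing acc with
  | nil => rfl
  | cons x t ih =>
    by_cases hp : p x
    · rw [List.filter_cons_of_pos hp, List.foldl_cons, List.foldl_cons, ← ih]
      congr 1
      by_cases hm : x ∈ acc
      · rw [PySem.Set.add_of_mem hm, PySem.Set.add_of_mem (List.mem_filter.mpr ⟨hm, hp⟩)]
      · rw [PySem.Set.add_of_not_mem hm,
          PySem.Set.add_of_not_mem (fun h => hm (List.mem_filter.mp h).1),
          List.filter_append]
        simp [hp]
    · rw [List.filter_cons_of_neg (by simpa using hp), List.foldl_cons, ← ih]
      congr 1
      by_cases hm : x ∈ acc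
      · rw [PySem.Set.add_of_mem hm]
      · rw [PySem.Set.add_of_not_mem hm, List.filter_append]
        simp [hp]

-- A's 'if item in dict: append else: = [date]' is exactly d.modify
theorem stepA_eq_modify (d : PySem.Dict String (List String)) (item dt : String) :
    (if d.contains item then d.insert item (d.getD item [] ++ [dt])
     else d.insert item [dt]) = d.modify item [] (· ++ [dt]) := by
  by_cases h : d.contains item
  · rw [if_pos h]; rfl
  · rw [if_neg h,
      show d.modify item [] (· ++ [dt]) = d.insert item (d.getD item [] ++ [dt]) from rfl,
      PySem.Dict.getD_of_not_contains d [] (by simpa using h)]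
    rfl

-- the combinatorial core: indexing the repeated occurrences = indexing all
-- occurrences and keeping the items with more than one date
theorem finalStep (occs : List (String × String)) :
    (buildIdx (occs.filter (fun o => decide (2 ≤ ((occs.map (·.1)).count o.1))))).items
      = ((buildIdx occs).items).filter (fun e => decide (1 < e.2.length)) := by
  set names := occs.map (·.1) with hnames
  set p' : String → Bool := fun k => decide (2 ≤ names.count k) with hp'
  rw [items_buildIdx, items_buildIdx, List.filter_map]
  have hq : List.filter ((fun (e : String × List String) => decide (1 < e.2.length)) ∘
        (fun k => (k, datesIn occs k))) (PySem.Set.ofList names)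
      = List.filter p' (PySem.Set.ofList names) := by
    apply List.filter_congr
    intro k _
    show decide (1 < (datesIn occs k).length) = p' k
    have hlen : (datesIn occs k).length = names.count k := by
      simp [datesIn, hnames, List.count, List.countP_map, Function.comp_def]
      rw [List.countP_eq_length_filter]
    rw [hlen, hp']
    exact decide_eq_decide.mpr (by omega)
  have hkeys : (occs.filter (fun o => p' o.1)).map (·.1) = names.filter p' :=
    (List.filter_map (f := fun o : String × String => o.1) (p := p') (l := occs)).symm
  have hof : PySem.Set.ofList (names.filter p') = (PySem.Set.ofList names).filter p' := by
    have h := ofList_filter p' names []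
    simpa [PySem.Set.ofList_eq_foldl] using h
  rw [hkeys, hof, hq]
  apply List.map_congr_left
  intro k hk
  have hpk : p' k = true := (List.mem_filter.mp hk).2
  have hdates : datesIn (occs.filter (fun o => p' o.1)) k = datesIn occs k := by
    show ((occs.filter (fun o => p' o.1)).filter (fun o => o.1 == k)).map (·.2)
        = (occs.filter (fun o => o.1 == k)).map (·.2)
    rw [List.filter_filter]
    congr 1
    apply List.filter_congr
    intro o _
    by_cases hbeq : o.1 == k
    · have : o.1 = k := eq_of_beq hbeq
      simp [this, hpk]
    · simp [hbeq]
  rw [hdates]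


theorem mainEq (xs : List (String × List String)) :
    extract_duplicates_py xs = extract_duplicates_py_alt xs := by
  set occs := occsOf xs with hoccs
  set names := occs.map (·.1) with hnames
  set p' : String → Bool := fun k => decide (2 ≤ names.count k) with hp'
  -- B side as buildIdx of the occurrence list
  have hB : extract_duplicates_py_alt xs
      = (buildIdx occs).items.filter (fun e => decide (1 < e.2.length)) := by
    show (List.foldl _ PySem.Dict.empty xs).items.filter _ = _
    rw [show (xs.foldl
        (fun (d : PySem.Dict String (List String)) p =>
          p.2.foldl (fun d item => d.modify item [] (· ++ [p.1])) d) PySem.Dict.empty)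
        = buildIdx occs from nestedFold (fun (d : PySem.Dict String (List String)) o => d.modify o.1 [] (· ++ [o.2])) xs PySem.Dict.empty]
  -- A side: the repeated set, then buildIdx of the filtered occurrence list
  have hrep : ∀ x, PySem.Set.contains
      ((xs.foldl
        (fun (sr : PySem.Set String × PySem.Set String) p =>
          p.2.foldl
            (fun sr item =>
              if PySem.Set.contains sr.1 item then (sr.1, PySem.Set.add sr.2 item)
              else (PySem.Set.add sr.1 item, sr.2)) sr)
        (PySem.Set.empty, PySem.Set.empty)).2) x = p' x := by
    intro x
    rw [show (xs.foldl
        (fun (sr : PySem.Set String × PySem.Set String) p =>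
          p.2.foldl
            (fun sr item =>
              if PySem.Set.contains sr.1 item then (sr.1, PySem.Set.add sr.2 item)
              else (PySem.Set.add sr.1 item, sr.2)) sr)
        (PySem.Set.empty, PySem.Set.empty))
        = (occs.foldl
            (fun (sr : PySem.Set String × PySem.Set String) o =>
              if PySem.Set.contains sr.1 o.1 then (sr.1, PySem.Set.add sr.2 o.1)
              else (PySem.Set.add sr.1 o.1, sr.2)) (PySem.Set.empty, PySem.Set.empty))
        from nestedFold (fun sr o =>
          if PySem.Set.contains sr.1 o.1 then (sr.1, PySem.Set.add sr.2 o.1)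
          else (PySem.Set.add sr.1 o.1, sr.2)) xs _]
    have h := pass1_mem occs PySem.Set.empty PySem.Set.empty x
    simp only [PySem.Set.empty, List.not_mem_nil, false_or, false_and] at h
    rw [hp', Bool.eq_iff_iff]
    constructor
    · intro hb
      exact decide_eq_true (h.mp (by simpa using hb))
    · intro hb
      simpa using h.mpr (of_decide_eq_true hb)
  rw [hB]
  rw [extract_duplicates_py.eq_def]
  simp only [hrep]
  rw [show (xs.foldl
      (fun (d : PySem.Dict String (List String)) p =>
        p.2.foldl
          (fun d item =>
            if p' item then
              if d.contains item then d.insert item (d.getD item [] ++ [p.1])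
              else d.insert item [p.1]
            else d) d)
      PySem.Dict.empty)
      = (occs.foldl
          (fun (d : PySem.Dict String (List String)) o =>
            if p' o.1 then
              if d.contains o.1 then d.insert o.1 (d.getD o.1 [] ++ [o.2])
              else d.insert o.1 [o.2]
            else d) PySem.Dict.empty)
      from nestedFold (fun (d : PySem.Dict String (List String)) o =>
        if p' o.1 then
          if d.contains o.1 then d.insert o.1 (d.getD o.1 [] ++ [o.2])
          else d.insert o.1 [o.2]
        else d) xs PySem.Dict.empty]
  simp only [stepA_eq_modify]
  rw [show (occs.foldl
      (fun (d : PySem.Dict String (List String)) o =>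
        if p' o.1 then d.modify o.1 [] (· ++ [o.2]) else d) PySem.Dict.empty)
      = buildIdx (occs.filter (fun o => p' o.1))
      from (List.foldl_filter).symm]
  exact finalStep occs

-- ===== VERDICT (by name: the statement is the Claim_ definition above) =====
theorem extract_duplicates_py_spec : Claim_equal_extract_duplicates_py := by
  intro xs _
  show extract_duplicates_py xs = extract_duplicates_py_alt xs
  exact mainEq xs
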